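-- pv_equiv track=rewrite | github.com/tie-ling/tub | 1/coma1/pa05.py | get_eqclasses
-- ===== SOURCE A (Python) =====
-- def get_classes(number_of_nodes, list_of_arrows):
--     node = 0
--     list_of_classes = []
--     while node < number_of_nodes:
--         list_of_classes_of_this_node = [node]
--         for arrow in list_of_arrows:
--             if arrow[0] == node:
--                 list_of_classes_of_this_node.append(arrow[1])
--         else:
--             list_of_classes_of_this_node.sort()
--             list_of_classes.append(list_of_classes_of_this_node)
--         node += 1
--     return list_of_classes
--
-- def get_eqclasses(number_of_nodes, list_of_arrows):
--     list_of_classes = get_classes(number_of_nodes, list_of_arrows)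
--     number_of_classes = len(list_of_classes)
--     list_of_eqclasses = []
--     class_index = 0
--     while class_index < number_of_classes:
--         set_class_index = set(list_of_classes[class_index])
--         for relation_class in list_of_classes[class_index::]:
--             set_relation_class = set(relation_class)
--             if set_class_index == set_relation_class:
--                 if relation_class not in list_of_eqclasses:
--                     list_of_eqclasses.append(relation_class)
--             elif ((set_class_index != set_relation_class) and
--                   (set_class_index.intersection(set_relation_class) != set())):
--                 return []
--         class_index += 1
--
--     return list_of_eqclasses
-- ===== SOURCE B (Python) =====
-- def get_eqclasses(number_of_nodes, list_of_arrows):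
--     targets = {}
--     for src, dst in list_of_arrows:
--         targets.setdefault(src, []).append(dst)
--     groups = {}   # canonical key -> distinct class lists of that group, in order
--     owner = {}    # element -> canonical key of the group owning it
--     for node in range(number_of_nodes):
--         cls = sorted([node] + targets.get(node, []))
--         key = tuple(sorted(set(cls)))
--         if key in groups:
--             if cls not in groups[key]:
--                 groups[key].append(cls)
--         else:
--             for x in key:
--                 if x in owner:
--                     return []
--                 owner[x] = key
--             groups[key] = [cls]
--     return [c for g in groups.values() for c in g]
-- ===== Notes on version B (the rewrite author's own statement) =====
-- stated objective: faster
-- what changed: Instead of rebuilding each node's class by scanning all arrows and then comparing every pair of classes as sets (re-scanning the class list and the output list), B groups arrows by source in one dict pass, then makes one pass over the nodes keeping a dict from canonical key (sorted distinct elements) to the group's distinct class lists and an element-to-key ownership map that detects an unequal overlap immediately.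
import Mathlib
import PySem

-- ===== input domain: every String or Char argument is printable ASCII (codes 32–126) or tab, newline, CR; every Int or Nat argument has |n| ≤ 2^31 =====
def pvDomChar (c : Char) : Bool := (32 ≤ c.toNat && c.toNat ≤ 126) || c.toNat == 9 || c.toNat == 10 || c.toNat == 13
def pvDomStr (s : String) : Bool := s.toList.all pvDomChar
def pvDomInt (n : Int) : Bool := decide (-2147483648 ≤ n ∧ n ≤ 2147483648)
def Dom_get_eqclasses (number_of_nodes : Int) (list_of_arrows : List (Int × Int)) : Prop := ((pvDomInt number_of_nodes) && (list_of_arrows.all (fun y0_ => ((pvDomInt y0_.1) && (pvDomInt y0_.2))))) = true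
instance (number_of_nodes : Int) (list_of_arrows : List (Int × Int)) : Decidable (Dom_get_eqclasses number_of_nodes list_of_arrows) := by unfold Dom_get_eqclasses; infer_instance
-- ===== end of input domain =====

-- B replaces A's arrow re-scan per node and quadratic pairwise set comparison by one
-- dict pass grouping arrows by source plus one pass over the nodes with a key->group dict
-- and an element->key ownership map (objective: faster).

-- ===== PORT A =====

-- body of A's while-loop in get_classes: this node's class, sorted
def aClassOf (list_of_arrows : List (Int × Int)) (node : Int) : List Int :=
  PySem.List.sorted
    (list_of_arrows.foldl (fun l arrow => if arrow.1 == node then l ++ [arrow.2] else l) [node])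
    (fun x => x) false

def get_classes_loop (number_of_nodes : Int) (list_of_arrows : List (Int × Int))
    (node : Int) (list_of_classes : List (List Int)) : List (List Int) :=
  if h : node < number_of_nodes then
    get_classes_loop number_of_nodes list_of_arrows (node + 1)
      (list_of_classes ++ [aClassOf list_of_arrows node])
  else list_of_classes
termination_by (number_of_nodes - node).toNat
decreasing_by omega

def get_classes (number_of_nodes : Int) (list_of_arrows : List (Int × Int)) : List (List Int) :=
  get_classes_loop number_of_nodes list_of_arrows 0 []

-- A's inner for-loop; none = the 'return []' escape
def aInner (set_class_index : PySem.Set Int) (suffix : List (List Int))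
    (list_of_eqclasses : List (List Int)) : Option (List (List Int)) :=
  match suffix with
  | [] => some list_of_eqclasses
  | relation_class :: rest =>
    let set_relation_class := PySem.Set.ofList relation_class
    if PySem.Set.equal set_class_index set_relation_class then
      aInner set_class_index rest
        (if list_of_eqclasses.contains relation_class then list_of_eqclasses
         else list_of_eqclasses ++ [relation_class])
    else if !PySem.Set.equal set_class_index set_relation_class &&
            !PySem.Set.equal (PySem.Set.inter set_class_index set_relation_class) PySem.Set.empty then
      none
    else
      aInner set_class_index rest list_of_eqclasses

-- A's outer while-loop
def aOuter (list_of_classes : List (List Int)) (number_of_classes : Int) (class_index : Int)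
    (list_of_eqclasses : List (List Int)) : List (List Int) :=
  if h : class_index < number_of_classes then
    match aInner (PySem.Set.ofList (PySem.List.pyGetD list_of_classes class_index []))
        (PySem.List.slice list_of_classes (some class_index) none) list_of_eqclasses with
    | none => []
    | some acc' => aOuter list_of_classes number_of_classes (class_index + 1) acc'
  else list_of_eqclasses
termination_by (number_of_classes - class_index).toNat
decreasing_by omega

def get_eqclasses (number_of_nodes : Int) (list_of_arrows : List (Int × Int)) : List (List Int) :=
  let list_of_classes := get_classes number_of_nodes list_of_arrows
  aOuter list_of_classes (PySem.List.len list_of_classes) 0 []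

-- ===== PORT B =====

-- targets.setdefault(src, []).append(dst) over all arrows
def bTargets (list_of_arrows : List (Int × Int)) : PySem.Dict Int (List Int) :=
  list_of_arrows.foldl (fun d p => d.modify p.1 [] (fun ts => ts ++ [p.2])) PySem.Dict.empty

-- register each element of a fresh key in owner; none = the 'return []' escape
def bAddOwner (owner : PySem.Dict Int (List Int)) (key : List Int) (elems : List Int) :
    Option (PySem.Dict Int (List Int)) :=
  match elems with
  | [] => some owner
  | x :: rest => if owner.contains x then none else bAddOwner (owner.insert x key) key rest

def bLoop (targets : PySem.Dict Int (List Int)) (nodes : List Int)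
    (groups : PySem.Dict (List Int) (List (List Int))) (owner : PySem.Dict Int (List Int)) :
    List (List Int) :=
  match nodes with
  | [] => groups.values.flatten
  | node :: rest =>
    let cls := PySem.List.sorted ([node] ++ targets.getD node []) (fun x => x) false
    let key := PySem.List.sorted (PySem.Set.ofList cls) (fun x => x) false
    if groups.contains key then
      bLoop targets rest (groups.modify key [] (fun g => if g.contains cls then g else g ++ [cls])) owner
    else
      match bAddOwner owner key key with
      | none => []
      | some owner' => bLoop targets rest (groups.insert key [cls]) owner'

def get_eqclasses_alt (number_of_nodes : Int) (list_of_arrows : List (Int × Int)) : List (List Int) :=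
  bLoop (bTargets list_of_arrows) (PySem.List.pyRange 0 number_of_nodes)
    PySem.Dict.empty PySem.Dict.empty

-- ===== PRECONDITION & SPEC =====
def Spec_get_eqclasses (number_of_nodes : Int) (list_of_arrows : List (Int × Int)) (out : List (List Int)) : Prop := out = get_eqclasses_alt number_of_nodes list_of_arrows
instance (number_of_nodes : Int) (list_of_arrows : List (Int × Int)) (out : List (List Int)) : Decidable (Spec_get_eqclasses number_of_nodes list_of_arrows out) := by unfold Spec_get_eqclasses; infer_instance

-- ===== CLAIM (what is proved, stated in full; the proofs are below) =====
def Claim_equal_get_eqclasses : Prop := ∀ (number_of_nodes : Int) (list_of_arrows : List (Int × Int)), Dom_get_eqclasses number_of_nodes list_of_arrows → Spec_get_eqclasses number_of_nodes list_of_arrows (get_eqclasses number_of_nodes list_of_arrows)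

-- ===== LEMMAS AND PROOFS =====

-- canonical key of a class: its distinct elements, sorted
def kf (c : List Int) : List Int :=
  PySem.List.sorted (PySem.Set.ofList c) (fun x => x) false

-- two classes whose element sets differ but intersect: A returns [] then
def Conflict (c c' : List Int) : Prop := kf c ≠ kf c' ∧ ∃ x ∈ c, x ∈ c'

def Bad (cs : List (List Int)) : Prop := ∃ c ∈ cs, ∃ c' ∈ cs, Conflict c c'

def badB (cs : List (List Int)) : Bool :=
  cs.any (fun c => cs.any (fun c' => (kf c != kf c') && c.any (fun x => c'.contains x)))

-- the common successful result: per first-occurring key, the distinct classes of that key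
def canon (cs : List (List Int)) : List (List Int) :=
  ((PySem.Set.ofList (cs.map kf)).map
    (fun K => PySem.Set.ofList (cs.filter (fun c => kf c == K)))).flatten

-- A's accumulator after the outer loop has processed indices < j
def accF (cs : List (List Int)) (j : Nat) : List (List Int) :=
  (((PySem.Set.ofList ((cs.take j).map kf))).map
    (fun K => PySem.Set.ofList (cs.filter (fun c => kf c == K)))).flatten

-- generic form of bLoop over an explicit list of classes
def bScan (suf : List (List Int)) (groups : PySem.Dict (List Int) (List (List Int)))
    (owner : PySem.Dict Int (List Int)) : List (List Int) :=
  match suf with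
  | [] => groups.values.flatten
  | cls :: rest =>
    let key := kf cls
    if groups.contains key then
      bScan rest (groups.modify key [] (fun g => if g.contains cls then g else g ++ [cls])) owner
    else
      match bAddOwner owner key key with
      | none => []
      | some owner' => bScan rest (groups.insert key [cls]) owner'

theorem mem_kf (c : List Int) (x : Int) : x ∈ kf c ↔ x ∈ c := by
  simp [kf, PySem.List.mem_sorted, PySem.Set.mem_ofList]

theorem kf_nodup (c : List Int) : (kf c).Nodup := by
  exact ((PySem.List.sorted_perm (PySem.Set.ofList c) (fun x => x) false).nodup_iff).mpr
    (PySem.Set.nodup_ofList c)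

theorem kf_eq_iff (c c' : List Int) : kf c = kf c' ↔ ∀ x, x ∈ c ↔ x ∈ c' := by
  constructor
  · intro h x
    rw [← mem_kf c x, ← mem_kf c' x, h]
  · intro h
    have hperm : (PySem.Set.ofList c).Perm (PySem.Set.ofList c') := by
      rw [List.perm_ext_iff_of_nodup (PySem.Set.nodup_ofList c) (PySem.Set.nodup_ofList c')]
      intro x
      rw [PySem.Set.mem_ofList, PySem.Set.mem_ofList]
      exact h x
    exact PySem.List.sorted_eq_sorted_of_perm _ _ (fun x => x) (fun a b hab => hab) hperm

theorem equal_ofList_iff_kf (c c' : List Int) :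
    PySem.Set.equal (PySem.Set.ofList c) (PySem.Set.ofList c') = true ↔ kf c = kf c' := by
  rw [PySem.Set.equal_iff, kf_eq_iff]
  constructor
  · intro h x
    have := h x
    rwa [PySem.Set.mem_ofList, PySem.Set.mem_ofList] at this
  · intro h x
    rw [PySem.Set.mem_ofList, PySem.Set.mem_ofList]
    exact h x

theorem inter_empty_iff (c c' : List Int) :
    PySem.Set.equal (PySem.Set.inter (PySem.Set.ofList c) (PySem.Set.ofList c')) PySem.Set.empty = true
      ↔ ∀ x ∈ c, x ∉ c' := by
  rw [PySem.Set.equal_iff]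
  constructor
  · intro h x hx hx'
    have := (h x).mp
    rw [PySem.Set.mem_inter, PySem.Set.mem_ofList, PySem.Set.mem_ofList] at this
    exact (List.not_mem_nil (a := x)).elim (this ⟨hx, hx'⟩)
  · intro h x
    rw [PySem.Set.mem_inter, PySem.Set.mem_ofList, PySem.Set.mem_ofList]
    constructor
    · rintro ⟨hx, hx'⟩; exact (h x hx hx').elim
    · intro hx; exact absurd hx (List.not_mem_nil)

theorem badB_iff (cs : List (List Int)) : badB cs = true ↔ Bad cs := by
  simp [badB, Bad, Conflict, List.any_eq_true]

theorem conflict_symm {c c' : List Int} (h : Conflict c c') : Conflict c' c := by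
  obtain ⟨hk, x, hx, hx'⟩ := h
  exact ⟨fun hh => hk hh.symm, x, hx', hx⟩

theorem contains_ite_eq_add (acc : List (List Int)) (c : List Int) :
    (if acc.contains c then acc else acc ++ [c]) = PySem.Set.add acc c := by
  rw [PySem.Set.add_eq_ite]
  simp

theorem update_of_subset {acc : PySem.Set (List Int)} {xs : List (List Int)}
    (h : ∀ c ∈ xs, c ∈ acc) : PySem.Set.update acc xs = acc := by
  rw [PySem.Set.update_eq_append_filter]
  have : List.filter (fun y => !PySem.Set.contains acc y) (PySem.Set.ofList xs) = [] := by
    rw [List.filter_eq_nil_iff]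
    intro a ha
    have : a ∈ acc := h a ((PySem.Set.mem_ofList xs a).mp ha)
    simpa using this
  rw [this, List.append_nil]

theorem update_of_disjoint {acc : PySem.Set (List Int)} {xs : List (List Int)}
    (h : ∀ c ∈ xs, c ∉ acc) : PySem.Set.update acc xs = acc ++ PySem.Set.ofList xs := by
  rw [PySem.Set.update_eq_append_filter]
  congr 1
  rw [List.filter_eq_self]
  intro a ha
  have : a ∉ acc := h a ((PySem.Set.mem_ofList xs a).mp ha)
  simpa using this

theorem aInner_some (c₀ : List Int) (l : List (List Int)) (acc : List (List Int))
    (hnc : ∀ c ∈ l, ¬ Conflict c₀ c) :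
    aInner (PySem.Set.ofList c₀) l acc
      = some (PySem.Set.update acc (l.filter (fun c => kf c == kf c₀))) := by
  induction l generalizing acc with
  | nil => simp [aInner, PySem.Set.update_nil]
  | cons rc rest ih =>
    by_cases heq : PySem.Set.equal (PySem.Set.ofList c₀) (PySem.Set.ofList rc) = true
    · have hkeq : kf c₀ = kf rc := (equal_ofList_iff_kf c₀ rc).mp heq
      simp only [aInner, heq, if_true, List.filter_cons, contains_ite_eq_add]
      rw [ih _ (fun c hc => hnc c (List.mem_cons_of_mem _ hc))]
      have : (kf rc == kf c₀) = true := beq_iff_eq.mpr hkeq.symm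
      rw [this, if_pos rfl, PySem.Set.update_cons]
    · have hkne : kf c₀ ≠ kf rc := fun hh => heq ((equal_ofList_iff_kf c₀ rc).mpr hh)
      have hnx : ∀ x ∈ c₀, x ∉ rc := by
        intro x hx hx'
        exact hnc rc (List.mem_cons_self) ⟨hkne, x, hx, hx'⟩
      have hint : PySem.Set.equal
          (PySem.Set.inter (PySem.Set.ofList c₀) (PySem.Set.ofList rc)) PySem.Set.empty = true :=
        (inter_empty_iff c₀ rc).mpr hnx
      have hbeq : (kf rc == kf c₀) = false := by
        rw [beq_eq_false_iff_ne]
        exact fun hh => hkne hh.symm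
      simp only [aInner, heq, hint, Bool.not_true, Bool.and_false, List.filter_cons,
        hbeq, Bool.false_eq_true, if_false]
      exact ih acc (fun c hc => hnc c (List.mem_cons_of_mem _ hc))

theorem aInner_none (c₀ : List Int) (l : List (List Int)) (acc : List (List Int))
    (hc : ∃ c ∈ l, Conflict c₀ c) :
    aInner (PySem.Set.ofList c₀) l acc = none := by
  induction l generalizing acc with
  | nil => obtain ⟨c, hcm, _⟩ := hc; exact absurd hcm (List.not_mem_nil)
  | cons rc rest ih =>
    obtain ⟨c, hcm, hconf⟩ := hc
    by_cases heq : PySem.Set.equal (PySem.Set.ofList c₀) (PySem.Set.ofList rc) = true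
    · have hkeq : kf c₀ = kf rc := (equal_ofList_iff_kf c₀ rc).mp heq
      have hcr : c ∈ rest := by
        rcases List.mem_cons.mp hcm with h | h
        · exact absurd hkeq (h ▸ hconf.1)
        · exact h
      simp only [aInner, heq, if_true]
      exact ih _ ⟨c, hcr, hconf⟩
    · by_cases hint : PySem.Set.equal
          (PySem.Set.inter (PySem.Set.ofList c₀) (PySem.Set.ofList rc)) PySem.Set.empty = true
      · have hnx : ∀ x ∈ c₀, x ∉ rc := (inter_empty_iff c₀ rc).mp hint
        have hcr : c ∈ rest := by
          rcases List.mem_cons.mp hcm with h | h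
          · subst h
            obtain ⟨_, x, hx, hx'⟩ := hconf
            exact absurd hx' (hnx x hx)
          · exact h
        simp only [aInner, heq, if_false, hint, Bool.not_true, Bool.and_false]
        exact ih _ ⟨c, hcr, hconf⟩
      · have hb : ((PySem.Set.ofList c₀).inter (PySem.Set.ofList rc)).equal PySem.Set.empty = false :=
          eq_false_of_ne_true hint
        simp only [aInner, heq, Bool.false_eq_true, if_false, hb, Bool.not_false]
        simp

theorem aOuter_step (cs : List (List Int)) (j : Nat) (acc : List (List Int))
    (hlt : j < cs.length) :
    aOuter cs (PySem.List.len cs) j acc =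
      (match aInner (PySem.Set.ofList cs[j]) (cs.drop j) acc with
       | none => []
       | some acc' => aOuter cs (PySem.List.len cs) (j + 1) acc') := by
  rw [aOuter]
  have hlt' : (j : Int) < PySem.List.len cs := by
    rw [PySem.List.len_eq]; exact_mod_cast hlt
  rw [dif_pos hlt']
  rw [PySem.List.pyGetD_natCast, List.getD_eq_getElem cs [] hlt,
    PySem.List.slice_from_natCast]

theorem aOuter_stop (cs : List (List Int)) (j : Nat) (acc : List (List Int))
    (hge : cs.length ≤ j) :
    aOuter cs (PySem.List.len cs) j acc = acc := by
  rw [aOuter]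
  have : ¬ ((j : Int) < PySem.List.len cs) := by
    rw [PySem.List.len_eq]
    exact_mod_cast Nat.not_lt.mpr hge
  rw [dif_neg this]

theorem aOuter_bad (cs : List (List Int)) (j : Nat) (acc : List (List Int))
    (hb : ∃ c ∈ cs.drop j, ∃ c' ∈ cs.drop j, Conflict c c') :
    aOuter cs (PySem.List.len cs) j acc = [] := by
  have main : ∀ (n j : Nat) (acc : List (List Int)), cs.length - j ≤ n →
      (∃ c ∈ cs.drop j, ∃ c' ∈ cs.drop j, Conflict c c') →
      aOuter cs (PySem.List.len cs) j acc = [] := by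
    intro n
    induction n with
    | zero =>
      intro j acc hle hb
      obtain ⟨c, hc, _⟩ := hb
      have : cs.length ≤ j := by omega
      rw [List.drop_eq_nil_of_le this] at hc
      exact absurd hc (List.not_mem_nil)
    | succ n ih =>
      intro j acc hle hb
      have hlt : j < cs.length := by
        by_contra hh
        obtain ⟨c, hc, _⟩ := hb
        rw [List.drop_eq_nil_of_le (by omega)] at hc
        exact absurd hc (List.not_mem_nil)
      rw [aOuter_step cs j acc hlt]
      by_cases hx : ∃ c' ∈ cs.drop j, Conflict cs[j] c'
      · rw [aInner_none _ _ _ hx]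
      · have hnc : ∀ c ∈ cs.drop j, ¬ Conflict cs[j] c := by
          intro c hc hcf
          exact hx ⟨c, hc, hcf⟩
        rw [aInner_some _ _ _ hnc]
        have hdrop : cs.drop j = cs[j] :: cs.drop (j + 1) := List.drop_eq_getElem_cons hlt
        obtain ⟨c, hc, c', hc', hcf⟩ := hb
        have hcd : c ∈ cs.drop (j + 1) := by
          rw [hdrop] at hc
          rcases List.mem_cons.mp hc with h | h
          · exact absurd hcf (h ▸ fun hh => hx ⟨c', hc', hh⟩)
          · exact h
        have hcd' : c' ∈ cs.drop (j + 1) := by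
          rw [hdrop] at hc'
          rcases List.mem_cons.mp hc' with h | h
          · subst h
            exact absurd (conflict_symm hcf) (fun hh => hx ⟨c, hc, hh⟩)
          · exact h
        exact ih (j + 1) _ (by omega) ⟨c, hcd, c', hcd', hcf⟩
  obtain ⟨c, hc, hrest⟩ := hb
  exact main (cs.length - j) j acc (le_refl _) ⟨c, hc, hrest⟩

theorem mem_accF {cs : List (List Int)} {j : Nat} {c : List Int} :
    c ∈ accF cs j ↔ c ∈ cs ∧ kf c ∈ (cs.take j).map kf := by
  unfold accF
  rw [List.mem_flatten]
  constructor
  · rintro ⟨l, hl, hcl⟩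
    obtain ⟨K, hK, rfl⟩ := List.mem_map.mp hl
    have := (PySem.Set.mem_ofList _ _).mp hcl
    have hmf := List.mem_filter.mp this
    have hkc : kf c = K := beq_iff_eq.mp hmf.2
    exact ⟨hmf.1, hkc ▸ (PySem.Set.mem_ofList _ _).mp hK⟩
  · rintro ⟨hccs, hkc⟩
    refine ⟨PySem.Set.ofList (cs.filter (fun c' => kf c' == kf c)), ?_, ?_⟩
    · exact List.mem_map.mpr ⟨kf c, (PySem.Set.mem_ofList _ _).mpr hkc, rfl⟩
    · exact (PySem.Set.mem_ofList _ _).mpr (List.mem_filter.mpr ⟨hccs, beq_iff_eq.mpr rfl⟩)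

theorem accF_succ_mem (cs : List (List Int)) (j : Nat) (hlt : j < cs.length)
    (hK : kf cs[j] ∈ (cs.take j).map kf) :
    accF cs (j + 1) = accF cs j := by
  unfold accF
  rw [List.take_succ_eq_append_getElem hlt, List.map_append, List.map_cons, List.map_nil,
    PySem.Set.ofList_append_singleton,
    PySem.Set.add_of_mem ((PySem.Set.mem_ofList _ _).mpr hK)]

theorem accF_succ_new (cs : List (List Int)) (j : Nat) (hlt : j < cs.length)
    (hK : kf cs[j] ∉ (cs.take j).map kf) :
    accF cs (j + 1) = accF cs j ++ PySem.Set.ofList (cs.filter (fun c => kf c == kf cs[j])) := by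
  unfold accF
  rw [List.take_succ_eq_append_getElem hlt, List.map_append, List.map_cons, List.map_nil,
    PySem.Set.ofList_append_singleton,
    PySem.Set.add_of_not_mem (fun hh => hK ((PySem.Set.mem_ofList _ _).mp hh)),
    List.map_append, List.flatten_append]
  simp

theorem filter_drop_eq (cs : List (List Int)) (j : Nat) (K : List Int)
    (hK : K ∉ (cs.take j).map kf) :
    (cs.drop j).filter (fun c => kf c == K) = cs.filter (fun c => kf c == K) := by
  conv_rhs => rw [← List.take_append_drop j cs]
  rw [List.filter_append]
  have : (cs.take j).filter (fun c => kf c == K) = [] := by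
    rw [List.filter_eq_nil_iff]
    intro c hc hbeq
    exact hK (beq_iff_eq.mp hbeq ▸ List.mem_map_of_mem hc)
  rw [this, List.nil_append]

theorem aOuter_good (cs : List (List Int)) (hg : ¬ Bad cs) :
    ∀ (j : Nat), j ≤ cs.length → aOuter cs (PySem.List.len cs) j (accF cs j) = canon cs := by
  have main : ∀ (n j : Nat), cs.length - j ≤ n → j ≤ cs.length →
      aOuter cs (PySem.List.len cs) j (accF cs j) = canon cs := by
    intro n
    induction n with
    | zero =>
      intro j hle hj
      have hj' : j = cs.length := by omega
      rw [aOuter_stop cs j _ (by omega)]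
      subst hj'
      unfold accF canon
      rw [List.take_length]
    | succ n ih =>
      intro j hle hj
      by_cases hlt : j < cs.length
      · rw [aOuter_step cs j _ hlt]
        have hnc : ∀ c ∈ cs.drop j, ¬ Conflict cs[j] c := by
          intro c hc hcf
          exact hg ⟨cs[j], List.getElem_mem hlt, c, List.mem_of_mem_drop hc, hcf⟩
        rw [aInner_some _ _ _ hnc]
        by_cases hK : kf cs[j] ∈ (cs.take j).map kf
        · have hsub : ∀ c ∈ (cs.drop j).filter (fun c => kf c == kf cs[j]), c ∈ accF cs j := by
            intro c hc
            have hmf := List.mem_filter.mp hc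
            exact mem_accF.mpr ⟨List.mem_of_mem_drop hmf.1, beq_iff_eq.mp hmf.2 ▸ hK⟩
          rw [update_of_subset hsub, ← accF_succ_mem cs j hlt hK]
          exact ih (j + 1) (by omega) (by omega)
        · have hdisj : ∀ c ∈ (cs.drop j).filter (fun c => kf c == kf cs[j]), c ∉ accF cs j := by
            intro c hc hmem
            have hmf := List.mem_filter.mp hc
            exact hK (beq_iff_eq.mp hmf.2 ▸ (mem_accF.mp hmem).2)
          rw [update_of_disjoint hdisj, filter_drop_eq cs j (kf cs[j]) hK, ← accF_succ_new cs j hlt hK]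
          exact ih (j + 1) (by omega) (by omega)
      · have hj' : j = cs.length := by omega
        rw [aOuter_stop cs j _ (by omega)]
        subst hj'
        unfold accF canon
        rw [List.take_length]
  intro j hj
  exact main (cs.length - j) j (le_refl _) hj

theorem get_classes_loop_eq (n : Int) (arrows : List (Int × Int)) :
    ∀ (node : Int) (acc : List (List Int)),
    get_classes_loop n arrows node acc = acc ++ (PySem.List.pyRange node n).map (aClassOf arrows) := by
  have main : ∀ (fuel : Nat) (node : Int) (acc : List (List Int)), (n - node).toNat ≤ fuel →
      get_classes_loop n arrows node acc = acc ++ (PySem.List.pyRange node n).map (aClassOf arrows) := by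
    intro fuel
    induction fuel with
    | zero =>
      intro node acc hle
      have hge : n ≤ node := by omega
      rw [get_classes_loop, dif_neg (by omega), PySem.List.pyRange_one_eq_nil hge,
        List.map_nil, List.append_nil]
    | succ fuel ih =>
      intro node acc hle
      by_cases hlt : node < n
      · rw [get_classes_loop, dif_pos hlt, ih (node + 1) _ (by omega),
          PySem.List.pyRange_one_cons hlt, List.map_cons]
        simp
      · rw [get_classes_loop, dif_neg hlt, PySem.List.pyRange_one_eq_nil (by omega),
          List.map_nil, List.append_nil]
  intro node acc
  exact main (n - node).toNat node acc (le_refl _)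

theorem accF_zero (cs : List (List Int)) : accF cs 0 = [] := by
  simp [accF, PySem.Set.ofList_nil]

theorem A_char (n : Int) (arrows : List (Int × Int)) :
    get_eqclasses n arrows =
      (if badB ((PySem.List.pyRange 0 n).map (aClassOf arrows)) then []
       else canon ((PySem.List.pyRange 0 n).map (aClassOf arrows))) := by
  set cs := (PySem.List.pyRange 0 n).map (aClassOf arrows) with hcs
  have hclasses : get_classes n arrows = cs := by
    rw [get_classes, get_classes_loop_eq, List.nil_append]
  rw [get_eqclasses]
  simp only [hclasses]
  by_cases hb : Bad cs
  · rw [if_pos ((badB_iff cs).mpr hb)]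
    obtain ⟨c, hc, c', hc', hcf⟩ := hb
    exact aOuter_bad cs 0 [] ⟨c, by simpa using hc, c', by simpa using hc', hcf⟩
  · rw [if_neg (fun hh => hb ((badB_iff cs).mp hh)), ← accF_zero cs]
    exact aOuter_good cs hb 0 (Nat.zero_le _)

theorem bAddOwner_none (key : List Int) :
    ∀ (xs : List Int) (o : PySem.Dict Int (List Int)), xs.Nodup →
    (bAddOwner o key xs = none ↔ ∃ x ∈ xs, o.contains x = true) := by
  intro xs
  induction xs with
  | nil => intro o _; simp [bAddOwner]
  | cons x rest ih =>
    intro o hnd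
    have hx_not : x ∉ rest := (List.nodup_cons.mp hnd).1
    have hnd' : rest.Nodup := (List.nodup_cons.mp hnd).2
    by_cases hc : o.contains x = true
    · simp [bAddOwner, hc]
    · have hc' : o.contains x = false := eq_false_of_ne_true hc
      rw [bAddOwner]
      simp only [hc', Bool.false_eq_true, if_false]
      rw [ih _ hnd']
      constructor
      · rintro ⟨y, hy, hyc⟩
        rw [PySem.Dict.contains_insert] at hyc
        have hyx : y ≠ x := fun hh => hx_not (hh ▸ hy)
        simp only [Bool.or_eq_true, beq_iff_eq] at hyc
        rcases hyc with h | h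
        · exact absurd h hyx
        · exact ⟨y, List.mem_cons_of_mem _ hy, h⟩
      · rintro ⟨y, hy, hyc⟩
        rcases List.mem_cons.mp hy with h | h
        · exact absurd (h ▸ hyc) hc
        · refine ⟨y, h, ?_⟩
          rw [PySem.Dict.contains_insert, hyc]
          simp

theorem bAddOwner_some (key : List Int) :
    ∀ (xs : List Int) (o o' : PySem.Dict Int (List Int)), xs.Nodup →
    bAddOwner o key xs = some o' →
    ∀ y, (o'.contains y = true ↔ o.contains y = true ∨ y ∈ xs) := by
  intro xs
  induction xs with
  | nil =>
    intro o o' _ hsome y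
    rw [bAddOwner] at hsome
    cases hsome
    simp
  | cons x rest ih =>
    intro o o' hnd hsome y
    have hnd' : rest.Nodup := (List.nodup_cons.mp hnd).2
    rw [bAddOwner] at hsome
    by_cases hc : o.contains x = true
    · simp [hc] at hsome
    · have hc' : o.contains x = false := eq_false_of_ne_true hc
      simp only [hc', Bool.false_eq_true, if_false] at hsome
      rw [ih _ _ hnd' hsome y, PySem.Dict.contains_insert]
      simp only [Bool.or_eq_true, beq_iff_eq, List.mem_cons]
      tauto

theorem bad_append_singleton {pre : List (List Int)} {c : List Int}
    (hnb : ¬ Bad pre) (hno : ∀ c' ∈ pre, ¬ Conflict c' c) : ¬ Bad (pre ++ [c]) := by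
  rintro ⟨a, ha, b, hb, hcf⟩
  rcases List.mem_append.mp ha with ha | ha <;> rcases List.mem_append.mp hb with hb | hb
  · exact hnb ⟨a, ha, b, hb, hcf⟩
  · have hb' : b = c := List.mem_singleton.mp hb
    exact hno a ha (hb' ▸ hcf)
  · have ha' : a = c := List.mem_singleton.mp ha
    exact hno b hb (conflict_symm (ha' ▸ hcf))
  · have ha' : a = c := List.mem_singleton.mp ha
    have hb' : b = c := List.mem_singleton.mp hb
    subst ha'; subst hb'
    exact hcf.1 rfl

theorem filter_append_singleton_self (pre : List (List Int)) (c : List Int) :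
    (pre ++ [c]).filter (fun c' => kf c' == kf c) = pre.filter (fun c' => kf c' == kf c) ++ [c] := by
  rw [List.filter_append]
  simp

theorem filter_append_singleton_ne (pre : List (List Int)) (c : List Int) (K : List Int)
    (hne : K ≠ kf c) :
    (pre ++ [c]).filter (fun c' => kf c' == K) = pre.filter (fun c' => kf c' == K) := by
  rw [List.filter_append]
  have : (kf c == K) = false := beq_eq_false_iff_ne.mpr (fun hh => hne hh.symm)
  simp [this]

theorem bScan_run :
    ∀ (suf pre : List (List Int)) (groups : PySem.Dict (List Int) (List (List Int)))
      (owner : PySem.Dict Int (List Int)),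
    groups.keys = PySem.Set.ofList (pre.map kf) →
    (∀ K, groups.getD K [] = PySem.Set.ofList (pre.filter (fun c => kf c == K))) →
    (∀ x, owner.contains x = true ↔ ∃ c ∈ pre, x ∈ c) →
    ¬ Bad pre →
    bScan suf groups owner = (if badB (pre ++ suf) then [] else canon (pre ++ suf)) := by
  intro suf
  induction suf with
  | nil =>
    intro pre groups owner hkeys hgetD howner hnb
    rw [List.append_nil]
    have hbf : badB pre = false := eq_false_of_ne_true (fun hh => hnb ((badB_iff pre).mp hh))
    rw [bScan, hbf]
    simp only [Bool.false_eq_true, if_false]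
    have hnd : groups.keys.Nodup := by
      rw [hkeys]; exact PySem.Set.nodup_ofList _
    rw [PySem.Dict.values_eq_map_keys groups hnd [], hkeys]
    have hfun : (fun k => groups.getD k []) =
        (fun K => PySem.Set.ofList (pre.filter (fun c => kf c == K))) := funext hgetD
    rw [hfun]
    rfl
  | cons c rest ih =>
    intro pre groups owner hkeys hgetD howner hnb
    have hassoc : pre ++ c :: rest = (pre ++ [c]) ++ rest := by simp
    have hKiff : groups.contains (kf c) = true ↔ kf c ∈ pre.map kf := by
      rw [PySem.Dict.contains_iff_mem_keys, hkeys, PySem.Set.mem_ofList]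
    by_cases hK : kf c ∈ pre.map kf
    · have hct : groups.contains (kf c) = true := hKiff.mpr hK
      rw [bScan]
      simp only [hct, if_true]
      obtain ⟨c₀, hc₀pre, hkc₀⟩ := List.mem_map.mp hK
      have hsame : ∀ x, x ∈ c₀ ↔ x ∈ c := (kf_eq_iff c₀ c).mp hkc₀
      have hno : ∀ c' ∈ pre, ¬ Conflict c' c := by
        rintro c' hc' ⟨hne, x, hx', hxc⟩
        exact hnb ⟨c', hc', c₀, hc₀pre, hkc₀ ▸ hne, x, hx', (hsame x).mpr hxc⟩
      have hnb' : ¬ Bad (pre ++ [c]) := bad_append_singleton hnb hno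
      have hkeys' : (groups.modify (kf c) []
            (fun g => if g.contains c then g else g ++ [c])).keys
          = PySem.Set.ofList (((pre ++ [c]).map kf)) := by
        rw [PySem.Dict.keys_modify, PySem.Dict.keys_insert_of_contains _ _ hct, hkeys,
          List.map_append, List.map_cons, List.map_nil, PySem.Set.ofList_append_singleton,
          PySem.Set.add_of_mem ((PySem.Set.mem_ofList _ _).mpr hK)]
      have hgetD' : ∀ K, (groups.modify (kf c) []
            (fun g => if g.contains c then g else g ++ [c])).getD K []
          = PySem.Set.ofList ((pre ++ [c]).filter (fun c' => kf c' == K)) := by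
        intro K
        rw [PySem.Dict.getD_modify]
        by_cases hKK : K = kf c
        · subst hKK
          rw [if_pos rfl, hgetD (kf c), contains_ite_eq_add, filter_append_singleton_self,
            PySem.Set.ofList_append_singleton]
        · rw [if_neg hKK, hgetD K, filter_append_singleton_ne pre c K hKK]
      have howner' : ∀ x, owner.contains x = true ↔ ∃ c' ∈ pre ++ [c], x ∈ c' := by
        intro x
        rw [howner x]
        constructor
        · rintro ⟨c', hc', hx⟩
          exact ⟨c', List.mem_append_left _ hc', hx⟩
        · rintro ⟨c', hc', hx⟩
          rcases List.mem_append.mp hc' with h | h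
          · exact ⟨c', h, hx⟩
          · have : c' = c := List.mem_singleton.mp h
            exact ⟨c₀, hc₀pre, (hsame x).mpr (this ▸ hx)⟩
      rw [hassoc]
      exact ih (pre ++ [c]) _ owner hkeys' hgetD' howner' hnb'
    · have hcf : groups.contains (kf c) = false :=
        eq_false_of_ne_true (fun hh => hK (hKiff.mp hh))
      rw [bScan]
      simp only [hcf, Bool.false_eq_true, if_false]
      have hknd : (kf c).Nodup := kf_nodup c
      cases hao : bAddOwner owner (kf c) (kf c) with
      | none =>
        obtain ⟨x, hxkf, hxo⟩ := (bAddOwner_none (kf c) (kf c) owner hknd).mp hao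
        obtain ⟨c', hc'pre, hxc'⟩ := (howner x).mp hxo
        have hne : kf c' ≠ kf c := fun hh => hK (hh ▸ List.mem_map_of_mem hc'pre)
        have hbad : Bad (pre ++ c :: rest) :=
          ⟨c', List.mem_append_left _ hc'pre, c,
            List.mem_append_right _ (List.mem_cons_self),
            hne, x, hxc', (mem_kf c x).mp hxkf⟩
        rw [(badB_iff _).mpr hbad]
        rfl
      | some owner' =>
        have hnoshare : ¬ ∃ x ∈ kf c, owner.contains x = true := by
          intro hx
          rw [← bAddOwner_none (kf c) (kf c) owner hknd] at hx
          rw [hao] at hx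
          cases hx
        have hno : ∀ c' ∈ pre, ¬ Conflict c' c := by
          rintro c' hc' ⟨_, x, hx', hxc⟩
          exact hnoshare ⟨x, (mem_kf c x).mpr hxc, (howner x).mpr ⟨c', hc', hx'⟩⟩
        have hnb' : ¬ Bad (pre ++ [c]) := bad_append_singleton hnb hno
        have hpref : pre.filter (fun c' => kf c' == kf c) = [] := by
          rw [List.filter_eq_nil_iff]
          intro c' hc' hbeq
          exact hK (beq_iff_eq.mp hbeq ▸ List.mem_map_of_mem hc')
        have hkeys' : ((groups.insert (kf c) [c])).keys
            = PySem.Set.ofList (((pre ++ [c]).map kf)) := by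
          rw [PySem.Dict.keys_insert_of_not_contains _ _ hcf, hkeys,
            List.map_append, List.map_cons, List.map_nil, PySem.Set.ofList_append_singleton,
            PySem.Set.add_of_not_mem (fun hh => hK ((PySem.Set.mem_ofList _ _).mp hh))]
        have hgetD' : ∀ K, (groups.insert (kf c) [c]).getD K []
            = PySem.Set.ofList ((pre ++ [c]).filter (fun c' => kf c' == K)) := by
          intro K
          rw [PySem.Dict.getD_insert]
          by_cases hKK : K = kf c
          · subst hKK
            rw [if_pos rfl, filter_append_singleton_self, hpref, List.nil_append]
            exact (PySem.Set.ofList_eq_self_of_nodup [c]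
              (List.nodup_cons.mpr ⟨List.not_mem_nil, List.nodup_nil⟩)).symm
          · rw [if_neg hKK, hgetD K, filter_append_singleton_ne pre c K hKK]
        have howner' : ∀ x, owner'.contains x = true ↔ ∃ c' ∈ pre ++ [c], x ∈ c' := by
          intro x
          rw [bAddOwner_some (kf c) (kf c) owner owner' hknd hao x, howner x, mem_kf]
          constructor
          · rintro (⟨c', hc', hx⟩ | hx)
            · exact ⟨c', List.mem_append_left _ hc', hx⟩
            · exact ⟨c, List.mem_append_right _ (List.mem_singleton_self c), hx⟩
          · rintro ⟨c', hc', hx⟩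
            rcases List.mem_append.mp hc' with h | h
            · exact Or.inl ⟨c', h, hx⟩
            · exact Or.inr ((List.mem_singleton.mp h) ▸ hx)
        rw [hassoc]
        exact ih (pre ++ [c]) _ owner' hkeys' hgetD' howner' hnb'

theorem bLoop_eq_bScan (t : PySem.Dict Int (List Int)) :
    ∀ (nodes : List Int) (groups : PySem.Dict (List Int) (List (List Int)))
      (owner : PySem.Dict Int (List Int)),
    bLoop t nodes groups owner =
      bScan (nodes.map (fun node =>
        PySem.List.sorted ([node] ++ t.getD node []) (fun x => x) false)) groups owner := by
  intro nodes
  induction nodes with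
  | nil => intro groups owner; rfl
  | cons node rest ih =>
    intro groups owner
    rw [List.map_cons, bLoop, bScan]
    simp only [kf]
    split
    · exact ih _ _
    · split
      · rfl
      · exact ih _ _

theorem clsT_eq_aClassOf (arrows : List (Int × Int)) (node : Int) :
    PySem.List.sorted ([node] ++ (bTargets arrows).getD node []) (fun x => x) false
      = aClassOf arrows node := by
  have h1 := PySem.List.foldl_append_if (fun arrow : Int × Int => arrow.1 == node)
    (fun arrow => arrow.2) arrows [node]
  rw [aClassOf, h1, bTargets, PySem.Dict.getD_foldl_modify_append, PySem.Dict.getD_empty,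
    List.nil_append]

theorem B_char (n : Int) (arrows : List (Int × Int)) :
    get_eqclasses_alt n arrows =
      (if badB ((PySem.List.pyRange 0 n).map (aClassOf arrows)) then []
       else canon ((PySem.List.pyRange 0 n).map (aClassOf arrows))) := by
  rw [get_eqclasses_alt, bLoop_eq_bScan]
  have hmap : (PySem.List.pyRange 0 n).map (fun node =>
        PySem.List.sorted ([node] ++ (bTargets arrows).getD node []) (fun x => x) false)
      = (PySem.List.pyRange 0 n).map (aClassOf arrows) := by
    apply List.map_congr_left
    intro node _
    exact clsT_eq_aClassOf arrows node
  rw [hmap]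
  have := bScan_run ((PySem.List.pyRange 0 n).map (aClassOf arrows)) []
      PySem.Dict.empty PySem.Dict.empty ?_ ?_ ?_ ?_
  · rw [this, List.nil_append]
  · simp [PySem.Dict.keys_empty, PySem.Set.ofList_nil]
  · intro K
    simp [PySem.Dict.getD_empty, PySem.Set.ofList_nil]
  · intro x
    simp [PySem.Dict.contains_empty]
  · rintro ⟨c, hc, _⟩
    exact absurd hc (List.not_mem_nil)

-- ===== VERDICT (by name: the statement is the Claim_ definition above) =====
theorem get_eqclasses_spec : Claim_equal_get_eqclasses := by
  intro n arrows _
  unfold Spec_get_eqclasses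
  rw [A_char, B_char]
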